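-- pv_equiv track=rewrite | github.com/alenny/leetcode-python3 | src/hexspeak.py | toHexspeak
-- ===== SOURCE A (Python) =====
-- def toHexspeak(num: str) -> str:
--     n = int(num)
--     codeA = ord('A')
--     ret = []
--     while n > 0:
--         d = n % 16
--         if d > 1 and d < 10:
--             return 'ERROR'
--         ret.append('O' if d == 0 else ('I' if d == 1 else chr(codeA + d - 10)))
--         n = n // 16
--     return ''.join(reversed(ret))
-- ===== SOURCE B (Python) =====
-- def toHexspeak(num: str) -> str:
--     n = int(num)
--     if n <= 0:
--         return ''
--     out = []
--     for c in format(n, 'X'):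
--         if c == '0':
--             out.append('O')
--         elif c == '1':
--             out.append('I')
--         elif '2' <= c <= '9':
--             return 'ERROR'
--         else:
--             out.append(c)
--     return ''.join(out)
-- ===== Notes on version B (the rewrite author's own statement) =====
-- stated objective: idiomatic
-- what changed: B delegates digit extraction to Python's built-in uppercase-hex formatting of n and does one forward scan over the hex string (guarding n<=0 first), instead of A's manual mod/div peel loop that accumulates least-significant-first and joins the reversed list.
import Mathlib
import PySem

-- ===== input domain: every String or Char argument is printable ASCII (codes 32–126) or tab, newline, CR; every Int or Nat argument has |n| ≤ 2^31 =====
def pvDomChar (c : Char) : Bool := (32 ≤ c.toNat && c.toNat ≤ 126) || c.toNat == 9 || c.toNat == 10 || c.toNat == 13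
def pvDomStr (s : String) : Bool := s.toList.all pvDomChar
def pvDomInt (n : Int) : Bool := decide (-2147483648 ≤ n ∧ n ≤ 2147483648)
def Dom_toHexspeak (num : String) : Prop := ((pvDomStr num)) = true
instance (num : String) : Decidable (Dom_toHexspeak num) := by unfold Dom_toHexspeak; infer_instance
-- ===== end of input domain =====

-- B delegates hex-digit extraction to number→hex-string conversion (Python's uppercase-hex format)
-- followed by one forward character scan, instead of A's manual mod/div peel loop; objective: idiomatic.


-- ===== PORT A =====
-- 'O' if d == 0 else ('I' if d == 1 else chr(codeA + d - 10)), codeA = ord('A') = 65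
def aDigitChar (d : Int) : Char :=
  if d = 0 then 'O' else if d = 1 then 'I' else Char.ofNat (65 + d - 10).toNat

theorem pv_floordiv16_lt (n : Int) (h : 0 < n) :
    (PySem.Int.floordiv n 16).toNat < n.toNat := by
  rw [PySem.Int.floordiv_eq_ediv_of_pos (by omega)]
  omega

-- the while-loop of A: state (n, ret); returns ''.join(reversed(ret)) when the loop exits
def aLoop (n : Int) (ret : List Char) : String :=
  if h : n > 0 then
    let d := PySem.Int.mod n 16
    if 1 < d ∧ d < 10 then "ERROR"
    else aLoop (PySem.Int.floordiv n 16) (ret ++ [aDigitChar d])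
  else String.mk ret.reverse
termination_by n.toNat
decreasing_by exact pv_floordiv16_lt n h

def toHexspeak (num : String) : String :=
  match PySem.Int.ofStr? num with
  | none => ""          -- int(num) raises ValueError here; excluded by Pre_toHexspeak
  | some n => aLoop n []

-- ===== PORT B =====
-- Python's uppercase-hex formatting of n, for n > 0: hex digits, most significant first
def bHexChar (d : Int) : Char :=
  if d < 10 then Char.ofNat (48 + d).toNat else Char.ofNat (55 + d).toNat

def bHex (n : Int) : List Char :=
  if h : n > 0 then bHex (PySem.Int.floordiv n 16) ++ [bHexChar (PySem.Int.mod n 16)]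
  else []
termination_by n.toNat
decreasing_by exact pv_floordiv16_lt n h

-- the for-loop of B: forward scan, early return on a digit 2..9
def bScan (cs : List Char) (out : List Char) : String :=
  match cs with
  | [] => String.mk out
  | c :: rest =>
    if c = '0' then bScan rest (out ++ ['O'])
    else if c = '1' then bScan rest (out ++ ['I'])
    else if '2' ≤ c ∧ c ≤ '9' then "ERROR"
    else bScan rest (out ++ [c])

def toHexspeak_alt (num : String) : String :=
  match PySem.Int.ofStr? num with
  | none => ""          -- int(num) raises ValueError here; excluded by Pre_toHexspeak
  | some n => if n ≤ 0 then "" else bScan (bHex n) []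

-- ===== PRECONDITION & SPEC =====
-- Pre_ excludes exactly the strings on which int(num) raises ValueError (both A and B raise there).
def Pre_toHexspeak (num : String) : Prop := (PySem.Int.ofStr? num).isSome = true
instance (num : String) : Decidable (Pre_toHexspeak num) := by unfold Pre_toHexspeak; infer_instance
def pvWitness_toHexspeak : String := "31"

def Spec_toHexspeak (num : String) (out : String) : Prop := out = toHexspeak_alt num
instance (num : String) (out : String) : Decidable (Spec_toHexspeak num out) := by unfold Spec_toHexspeak; infer_instance

-- ===== CLAIM (what is proved, stated in full; the proofs are below) =====
def Claim_equal_toHexspeak : Prop := ∀ (num : String), Dom_toHexspeak num → Pre_toHexspeak num → Spec_toHexspeak num (toHexspeak num)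

-- ===== LEMMAS AND PROOFS =====
def pvBad (c : Char) : Bool := decide ('2' ≤ c ∧ c ≤ '9')
def pvMap (c : Char) : Char := if c = '0' then 'O' else if c = '1' then 'I' else c

theorem pvDigit_facts (d : Int) (h0 : 0 ≤ d) (h16 : d < 16) :
    (pvBad (bHexChar d) = decide (1 < d ∧ d < 10)) ∧
    (¬ (1 < d ∧ d < 10) → aDigitChar d = pvMap (bHexChar d)) := by
  interval_cases d <;> exact ⟨by decide, by decide⟩

theorem bScan_eq (cs : List Char) (out : List Char) :
    bScan cs out = if cs.any pvBad then "ERROR" else String.mk (out ++ cs.map pvMap) := by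
  induction cs generalizing out with
  | nil => simp [bScan]
  | cons c rest ih =>
    by_cases h0 : c = '0'
    · subst h0; simp [bScan, ih, pvBad, pvMap, List.append_assoc]
    · by_cases h1 : c = '1'
      · subst h1; simp [bScan, ih, pvBad, pvMap, List.append_assoc]
      · by_cases hb : '2' ≤ c ∧ c ≤ '9'
        · have : pvBad c = true := by simp [pvBad, hb]
          simp [bScan, h0, h1, hb, this]
        · have : pvBad c = false := by simp [pvBad, hb]
          simp [bScan, h0, h1, hb, ih, this, pvMap, List.append_assoc]

theorem aLoop_eq (k : Nat) : ∀ (n : Int), n.toNat ≤ k → ∀ (ret : List Char),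
    aLoop n ret =
      if (bHex n).any pvBad then "ERROR"
      else String.mk ((bHex n).map pvMap ++ ret.reverse) := by
  induction k with
  | zero =>
    intro n hn ret
    have hnp : ¬ n > 0 := by omega
    rw [aLoop, bHex]
    simp [hnp]
  | succ k ih =>
    intro n hn ret
    by_cases hp : n > 0
    · have hm : PySem.Int.mod n 16 = n % 16 := PySem.Int.mod_eq_emod_of_pos (by omega)
      have hf : PySem.Int.floordiv n 16 = n / 16 := PySem.Int.floordiv_eq_ediv_of_pos (by omega)
      have hd0 : 0 ≤ n % 16 := by omega
      have hd16 : n % 16 < 16 := by omega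
      obtain ⟨hbadeq, hchar⟩ := pvDigit_facts (n % 16) hd0 hd16
      rw [aLoop, bHex]
      rw [dif_pos hp, dif_pos hp, hm, hf]
      simp only []
      by_cases hb : 1 < n % 16 ∧ n % 16 < 10
      · have hbt : pvBad (bHexChar (n % 16)) = true := by
          rw [hbadeq]; exact decide_eq_true hb
        simp [hb, hbt]
      · have hbf : pvBad (bHexChar (n % 16)) = false := by
          rw [hbadeq]; exact decide_eq_false hb
        rw [if_neg hb, ih (n / 16) (by omega)]
        simp [hbf, hchar hb, List.append_assoc]
    · rw [aLoop, bHex]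
      simp [hp]

-- ===== VERDICT (by name: the statement is the Claim_ definition above) =====
theorem toHexspeak_spec : Claim_equal_toHexspeak := by
  intro num _ hpre
  unfold Spec_toHexspeak toHexspeak toHexspeak_alt
  cases h : PySem.Int.ofStr? num with
  | none => rfl
  | some n =>
    show aLoop n [] = if n ≤ 0 then "" else bScan (bHex n) []
    by_cases hle : n ≤ 0
    · have hnp : ¬ n > 0 := by omega
      rw [aLoop, if_pos hle]
      simp [hnp]
      rfl
    · rw [if_neg hle, aLoop_eq n.toNat n (le_refl _) [], bScan_eq]
      simp
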